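-- pv_equiv track=rewrite | github.com/fakhriaunur/leetcode | algomonster/dsu-umbristan.py | umbristan
-- ===== SOURCE A (Python) =====
-- class UnionFind:
--     def __init__(self):
--         self.id = {}
--
--     def find(self, x):
--         y = self.id.get(x, x)
--
--         if y != x:
--             self.id[x] = y = self.find(y)
--
--         return y
--
--     def union(self, x, y):
--         self.id[self.find(x)] = self.find(y)
--
-- def umbristan(n: int, breaks: list[list[int]]) -> list[int]:
--     dsu = UnionFind()
--     ans = []
--     connected_count = n
--
--     breaks.reverse()
--
--     for a, b in breaks:
--         ans.append(connected_count)
--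
--         if dsu.find(a) != dsu.find(b):
--             dsu.union(a, b)
--             connected_count -= 1
--
--     ans.reverse()
--     return ans
-- ===== SOURCE B (Python) =====
-- def umbristan(n: int, breaks: list[list[int]]) -> list[int]:
--     # Two staged passes instead of one loop recording counts:
--     # pass 1 runs the DSU over reversed(breaks) and records only a 0/1 merge
--     # flag per edge; pass 2 is a plain scan turning the flags into component
--     # counts. The DSU is a dict with an iterative two-pass find (no recursion,
--     # no class). Does not mutate `breaks`.
--     parent = {}
--
--     def find(x):
--         path = []
--         while parent.get(x, x) != x:
--             path.append(x)
--             x = parent[x]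
--         for v in reversed(path):
--             parent[v] = x
--         return x
--
--     def union(x, y):
--         parent[find(x)] = find(y)
--
--     merges = []
--     for a, b in reversed(breaks):
--         if find(a) != find(b):
--             union(a, b)
--             merges.append(1)
--         else:
--             merges.append(0)
--
--     count = n
--     counts = []
--     for f in merges:
--         counts.append(count)
--         count -= f
--     counts.reverse()
--     return counts
-- ===== Notes on version B (the rewrite author's own statement) =====
-- stated objective: alternative
-- what changed: The UnionFind class with recursive path-compressing find becomes a plain dict with an iterative while-loop find (path collected, then compressed in a second pass), and the single count-recording loop is split into two staged passes: a reverse DSU pass emitting only 0/1 merge flags, then a separate scan converting flags into component counts; breaks is not mutated.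
import Mathlib
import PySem

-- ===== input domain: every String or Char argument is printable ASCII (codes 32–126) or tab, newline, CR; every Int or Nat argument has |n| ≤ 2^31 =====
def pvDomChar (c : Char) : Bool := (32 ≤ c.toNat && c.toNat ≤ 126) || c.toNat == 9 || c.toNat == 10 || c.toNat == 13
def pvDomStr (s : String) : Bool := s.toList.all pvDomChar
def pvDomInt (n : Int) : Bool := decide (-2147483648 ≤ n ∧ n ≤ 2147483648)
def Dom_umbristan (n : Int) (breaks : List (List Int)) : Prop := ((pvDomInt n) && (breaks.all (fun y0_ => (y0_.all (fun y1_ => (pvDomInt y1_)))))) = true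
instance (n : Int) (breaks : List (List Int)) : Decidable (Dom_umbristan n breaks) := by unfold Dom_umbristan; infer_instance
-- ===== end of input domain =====

-- B replaces A's recursive path-compressing find by an iterative two-pass find over a
-- plain dict, and splits the driver into two staged passes (merge flags, then a count
-- scan); equivalence is about the RETURN value only (A reverses `breaks` in place, B does not).


-- ===== PORT A =====
-- A's recursive find with path compression (fuel bounds the recursion depth;
-- breaks.length + 2 always suffices since find adds no keys and union adds at most one key per edge)
def findA (fuel : Nat) (d : PySem.Dict Int Int) (x : Int) : Int × PySem.Dict Int Int :=
  match fuel with
  | 0 => (x, d)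
  | fuel + 1 =>
    let y := d.getD x x
    if y ≠ x then
      let r := (findA fuel d y).1
      (r, (findA fuel d y).2.insert x r)
    else (y, d)

def unionA (fuel : Nat) (d : PySem.Dict Int Int) (x y : Int) : PySem.Dict Int Int :=
  let fx := findA fuel d x
  let fy := findA fuel fx.2 y
  fy.2.insert fx.1 fy.1

-- one iteration of A's `for a, b in breaks` loop body (after the in-place reverse);
-- state = (dict, connected_count, ans)
def stepA (fuel : Nat) (st : PySem.Dict Int Int × Int × List Int) (e : List Int) :
    PySem.Dict Int Int × Int × List Int :=
  match e with
  | [a, b] =>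
    let ans := st.2.2 ++ [st.2.1]
    let fa := findA fuel st.1 a
    let fb := findA fuel fa.2 b
    if fa.1 ≠ fb.1 then (unionA fuel fb.2 a b, st.2.1 - 1, ans)
    else (fb.2, st.2.1, ans)
  | _ => st                                        -- rows not of length 2 raise in Python: outside Pre_

def umbristan (n : Int) (breaks : List (List Int)) : List Int :=
  let fuel := breaks.length + 2
  let final := breaks.reverse.foldl (stepA fuel) (PySem.Dict.empty, n, [])
  final.2.2.reverse

-- ===== PORT B =====
-- iterative find: first pass walks the parent chain collecting the path,
-- second pass points every path node at the root
def walkB (fuel : Nat) (d : PySem.Dict Int Int) (x : Int) (path : List Int) : Int × List Int :=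
  match fuel with
  | 0 => (x, path)
  | fuel + 1 =>
    let y := d.getD x x
    if y ≠ x then walkB fuel d y (path ++ [x]) else (x, path)

def findB (fuel : Nat) (d : PySem.Dict Int Int) (x : Int) : Int × PySem.Dict Int Int :=
  let w := walkB fuel d x []
  (w.1, w.2.reverse.foldl (fun dd v => dd.insert v w.1) d)

def unionB (fuel : Nat) (d : PySem.Dict Int Int) (x y : Int) : PySem.Dict Int Int :=
  let fx := findB fuel d x
  let fy := findB fuel fx.2 y
  fy.2.insert fx.1 fy.1

-- pass 1 of B: one reversed edge → a 0/1 merge flag; state = (dict, merges)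
def mergePass (fuel : Nat) (st : PySem.Dict Int Int × List Int) (e : List Int) :
    PySem.Dict Int Int × List Int :=
  match e with
  | [a, b] =>
    let fa := findB fuel st.1 a
    let fb := findB fuel fa.2 b
    if fa.1 ≠ fb.1 then (unionB fuel fb.2 a b, st.2 ++ [1])
    else (fb.2, st.2 ++ [0])
  | _ => st                                        -- rows not of length 2 raise in Python: outside Pre_

-- pass 2 of B: scan the flags into component counts; state = (count, counts)
def scanCounts (st : Int × List Int) (f : Int) : Int × List Int :=
  (st.1 - f, st.2 ++ [st.1])

def umbristan_alt (n : Int) (breaks : List (List Int)) : List Int :=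
  let fuel := breaks.length + 2
  let merges := (breaks.reverse.foldl (mergePass fuel) (PySem.Dict.empty, [])).2
  (merges.foldl scanCounts (n, [])).2.reverse

-- ===== PRECONDITION & SPEC =====
-- Pre_ excludes exactly the rows on which Python's `for a, b in …` unpacking raises ValueError.
def Pre_umbristan (n : Int) (breaks : List (List Int)) : Prop := ∀ e ∈ breaks, e.length = 2
instance (n : Int) (breaks : List (List Int)) : Decidable (Pre_umbristan n breaks) := by unfold Pre_umbristan; infer_instance
def pvWitness_umbristan : Int × List (List Int) := (3, [[1, 2], [2, 3], [1, 3]])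

def Spec_umbristan (n : Int) (breaks : List (List Int)) (out : List Int) : Prop := out = umbristan_alt n breaks
instance (n : Int) (breaks : List (List Int)) (out : List Int) : Decidable (Spec_umbristan n breaks out) := by unfold Spec_umbristan; infer_instance

-- ===== CLAIM (what is proved, stated in full; the proofs are below) =====
def Claim_equal_umbristan : Prop := ∀ (n : Int) (breaks : List (List Int)), Dom_umbristan n breaks → Pre_umbristan n breaks → Spec_umbristan n breaks (umbristan n breaks)

-- ===== LEMMAS AND PROOFS =====

-- the while-loop of B's find with accumulator `path` only ever appends to it
theorem walkB_acc (fuel : Nat) (d : PySem.Dict Int Int) :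
    ∀ (x : Int) (path : List Int),
      walkB fuel d x path = ((walkB fuel d x []).1, path ++ (walkB fuel d x []).2) := by
  induction fuel with
  | zero => intro x path; simp [walkB]
  | succ f ih =>
    intro x path
    simp only [walkB]
    by_cases h : d.getD x x ≠ x
    · simp only [if_pos h, List.nil_append]
      rw [ih (d.getD x x) (path ++ [x]), ih (d.getD x x) [x]]
      simp
    · simp [if_neg h]

-- the recursive find of A and the two-pass iterative find of B agree (root and dict)
theorem find_eq (fuel : Nat) (d : PySem.Dict Int Int) : ∀ x, findA fuel d x = findB fuel d x := by
  induction fuel with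
  | zero => intro x; simp [findA, findB, walkB]
  | succ f ih =>
    intro x
    simp only [findA, findB, walkB]
    by_cases h : d.getD x x ≠ x
    · simp only [if_pos h, List.nil_append]
      rw [ih (d.getD x x)]
      rw [walkB_acc f d (d.getD x x) [x]]
      simp only [findB, List.singleton_append, List.reverse_cons, List.foldl_append,
        List.foldl_cons, List.foldl_nil]
    · rw [not_ne_iff] at h
      simp [h]

theorem union_eq (fuel : Nat) (d : PySem.Dict Int Int) (x y : Int) :
    unionA fuel d x y = unionB fuel d x y := by
  simp [unionA, unionB, find_eq]

-- A's single loop is the composition of B's two passes: its (count, ans)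
-- components are obtained by scanning B's merge flags
theorem passes_eq (fuel : Nat) (n : Int) :
    ∀ (l : List (List Int)), (∀ e ∈ l, e.length = 2) →
      ∀ (d : PySem.Dict Int Int) (c : Int) (ans flags : List Int),
        flags.foldl scanCounts (n, []) = (c, ans) →
        l.foldl (stepA fuel) (d, c, ans) =
          ((l.foldl (mergePass fuel) (d, flags)).1,
           ((l.foldl (mergePass fuel) (d, flags)).2).foldl scanCounts (n, [])) := by
  intro l
  induction l with
  | nil => intro _ d c ans flags h; simpa using h.symm
  | cons e rest ih =>
    intro hlen d c ans flags h
    have he : e.length = 2 := hlen e (List.mem_cons_self)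
    have hrest : ∀ e' ∈ rest, e'.length = 2 := fun e' he' => hlen e' (List.mem_cons_of_mem _ he')
    match e, he with
    | [a, b], _ =>
      simp only [List.foldl_cons, stepA, mergePass, find_eq, union_eq]
      by_cases hr : (findB fuel d a).1 ≠ (findB fuel (findB fuel d a).2 b).1
      · simp only [if_pos hr]
        exact ih hrest _ _ _ _ (by simp [List.foldl_append, scanCounts, h])
      · simp only [if_neg hr]
        exact ih hrest _ _ _ _ (by simp [List.foldl_append, scanCounts, h])

-- ===== VERDICT (by name: the statement is the Claim_ definition above) =====
theorem umbristan_spec : Claim_equal_umbristan := by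
  intro n breaks _ hpre
  show umbristan n breaks = umbristan_alt n breaks
  unfold umbristan umbristan_alt
  have := passes_eq (breaks.length + 2) n breaks.reverse
    (fun e he => hpre e (List.mem_reverse.mp he))
    PySem.Dict.empty n [] [] rfl
  simp only [this]
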